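-- pv_equiv track=rewrite | github.com/Andh2024/data_scraper_project | test_Salome.py | _parse_srcset_first
-- ===== SOURCE A (Python) =====
-- def _parse_srcset_first(srcset: str) -> str:
--     if not srcset:
--         return ""
--     parts = [p.strip() for p in srcset.split(",") if p.strip()]
--     if not parts:
--         return ""
--     first = parts[0]
--     return first.split()[0]
-- ===== SOURCE B (Python) =====
-- def _parse_srcset_first(srcset: str) -> str:
--     # Single left-to-right scan: skip leading commas/whitespace, then take the
--     # first maximal run of characters that are neither commas nor whitespace.
--     n = len(srcset)
--     i = 0
--     while i < n and (srcset[i] == "," or srcset[i].isspace()):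
--         i += 1
--     j = i
--     while j < n and not (srcset[j] == "," or srcset[j].isspace()):
--         j += 1
--     return srcset[i:j]
-- ===== Notes on version B (the rewrite author's own statement) =====
-- stated objective: alternative
-- what changed: Replaces the split-by-comma / strip / filter / whitespace-split pipeline with a single left-to-right index scan that skips leading commas-and-whitespace and takes the first maximal run of non-separator characters; it trades A's C-level str methods for one explicit linear scan.
import Mathlib
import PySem

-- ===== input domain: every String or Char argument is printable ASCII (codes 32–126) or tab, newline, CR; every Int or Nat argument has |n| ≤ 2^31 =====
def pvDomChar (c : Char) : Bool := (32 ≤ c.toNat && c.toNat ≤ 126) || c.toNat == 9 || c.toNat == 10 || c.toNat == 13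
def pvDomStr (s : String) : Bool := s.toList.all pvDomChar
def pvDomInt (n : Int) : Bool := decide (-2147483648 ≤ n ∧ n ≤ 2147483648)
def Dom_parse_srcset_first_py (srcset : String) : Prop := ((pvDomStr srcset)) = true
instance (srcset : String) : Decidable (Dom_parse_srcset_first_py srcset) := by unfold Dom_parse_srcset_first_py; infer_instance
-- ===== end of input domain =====

-- B replaces A's split-by-comma / strip / filter / whitespace-split pipeline by one
-- left-to-right scan: skip leading commas/whitespace, then take the first maximal run
-- of non-separator characters (an alternative single-scan decomposition, same cost).

-- ===== PORT A =====
def parse_srcset_first_py (srcset : String) : String :=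
  if srcset == "" then ""
  else
    -- srcset.split(",") : the separator "," is non-empty, so split? is always `some`
    let segs := (PySem.Str.split? srcset ",").getD []
    let parts := (segs.map PySem.Str.strip).filter (fun p => !(p == ""))
    match parts with
    | [] => ""
    | first :: _ =>
      match PySem.Str.split₀ first with
      | [] => ""   -- unreachable: `first` is non-empty after strip, so split() is non-empty
      | t :: _ => t

-- ===== PORT B =====
def parse_srcset_first_py_alt (srcset : String) : String :=
  let cs := srcset.toList
  -- first while loop: advance i past commas and whitespace
  let rest := cs.dropWhile (fun c => c == ',' || PySem.Chars.isspace c)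
  -- second while loop: advance j while not comma/whitespace; return srcset[i:j]
  String.ofList (rest.takeWhile (fun c => !(c == ',' || PySem.Chars.isspace c)))

-- ===== PRECONDITION & SPEC =====
def Spec_parse_srcset_first_py (srcset : String) (out : String) : Prop := out = parse_srcset_first_py_alt srcset
instance (srcset : String) (out : String) : Decidable (Spec_parse_srcset_first_py srcset out) := by unfold Spec_parse_srcset_first_py; infer_instance

-- ===== CLAIM (what is proved, stated in full; the proofs are below) =====
def Claim_equal_parse_srcset_first_py : Prop := ∀ (srcset : String), Dom_parse_srcset_first_py srcset → Spec_parse_srcset_first_py srcset (parse_srcset_first_py srcset)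

-- ===== LEMMAS AND PROOFS =====

-- the separator class: comma or (Python) whitespace
def pvSep (c : Char) : Bool := c == ',' || PySem.Chars.isspace c

-- simple reference recursion for `split(",")`
def pvSpl : List Char → List (List Char)
  | [] => [[]]
  | c :: rest => if c = ',' then [] :: pvSpl rest else (pvSpl rest).modifyHead (c :: ·)

theorem pvSpl_ne_nil (l : List Char) : pvSpl l ≠ [] := by
  induction l with
  | nil => simp [pvSpl]
  | cons c rest ih =>
    simp only [pvSpl]
    split
    · simp
    · obtain ⟨h, t, hr⟩ := List.exists_cons_of_ne_nil ih
      simp [hr]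

theorem pvSpl_go (l : List Char) : ∀ (fuel : Nat) (cur : List Char) (acc : List (List Char)),
    l.length ≤ fuel →
    PySem.Chars.splitOn.go [','] fuel l cur acc
      = acc.reverse ++ (cur.reverse ++ (pvSpl l).headI) :: (pvSpl l).tail := by
  induction l with
  | nil =>
    intro fuel cur acc _
    cases fuel <;> simp [PySem.Chars.splitOn.go, pvSpl]
  | cons c rest ih =>
    intro fuel cur acc hlen
    cases fuel with
    | zero => simp at hlen
    | succ f =>
      have hlen' : rest.length ≤ f := by simpa using Nat.le_of_succ_le_succ hlen
      obtain ⟨h', t', hrest⟩ := List.exists_cons_of_ne_nil (pvSpl_ne_nil rest)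
      by_cases hc : c = ','
      · subst hc
        have hpre : [','].isPrefixOf (',' :: rest) = true := by
          simp [List.isPrefixOf]
        simp only [PySem.Chars.splitOn.go, hpre, if_pos, List.length_cons, List.length_nil,
          Nat.zero_add, List.drop_succ_cons, List.drop_zero]
        rw [ih f [] (cur.reverse :: acc) hlen']
        simp [pvSpl, hrest]
      · have hpre : [','].isPrefixOf (c :: rest) = false := by
          simp only [List.isPrefixOf, Bool.and_eq_false_iff]
          left
          simpa [beq_iff_eq] using fun hcc => hc hcc.symm
        simp only [PySem.Chars.splitOn.go, hpre, Bool.false_eq_true, if_false]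
        rw [ih f (c :: cur) acc hlen']
        simp [pvSpl, hc, hrest]

theorem splitOn_eq_pvSpl (cs : List Char) : PySem.Chars.splitOn cs [','] = pvSpl cs := by
  obtain ⟨h, t, hspl⟩ := List.exists_cons_of_ne_nil (pvSpl_ne_nil cs)
  unfold PySem.Chars.splitOn
  rw [pvSpl_go cs (cs.length + 1) [] [] (Nat.le_succ _)]
  simp [hspl]

-- head of pvSpl is the leading run of non-comma characters
theorem pvSpl_head (cs : List Char) :
    ∃ t, pvSpl cs = cs.takeWhile (fun c => !(c == ',')) :: t := by
  induction cs with
  | nil => exact ⟨[], rfl⟩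
  | cons c rest ih =>
    by_cases hc : c = ','
    · subst hc
      exact ⟨pvSpl rest, by simp [pvSpl]⟩
    · obtain ⟨t, ht⟩ := ih
      refine ⟨t, ?_⟩
      simp [pvSpl, hc, ht]

-- split₀.go always appends after acc.reverse
theorem split₀_go_acc (l : List Char) : ∀ (cur : List Char) (acc : List (List Char)),
    ∃ t, PySem.Chars.split₀.go l cur acc = acc.reverse ++ t := by
  induction l with
  | nil =>
    intro cur acc
    by_cases h : cur.isEmpty
    · exact ⟨[], by simp [PySem.Chars.split₀.go, h]⟩
    · exact ⟨[cur.reverse], by simp [PySem.Chars.split₀.go, h]⟩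
  | cons c rest ih =>
    intro cur acc
    by_cases hs : PySem.Chars.isspace c
    · by_cases he : cur.isEmpty
      · obtain ⟨t, ht⟩ := ih [] acc
        exact ⟨t, by simp [PySem.Chars.split₀.go, hs, he, ht]⟩
      · obtain ⟨t, ht⟩ := ih [] (cur.reverse :: acc)
        refine ⟨cur.reverse :: t, ?_⟩
        simp [PySem.Chars.split₀.go, hs, he, ht]
    · obtain ⟨t, ht⟩ := ih (c :: cur) acc
      exact ⟨t, by simp [PySem.Chars.split₀.go, hs, ht]⟩

-- split₀.go with a non-empty current word: the first emitted word is cur.reverse ++ leading run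
theorem split₀_go_word (l : List Char) : ∀ (cur : List Char) (acc : List (List Char)), cur ≠ [] →
    ∃ t, PySem.Chars.split₀.go l cur acc =
      acc.reverse ++ (cur.reverse ++ l.takeWhile (fun c => !PySem.Chars.isspace c)) :: t := by
  induction l with
  | nil =>
    intro cur acc hcur
    refine ⟨[], ?_⟩
    have he : cur.isEmpty = false := by simpa using hcur
    simp [PySem.Chars.split₀.go, he]
  | cons c rest ih =>
    intro cur acc hcur
    have he : cur.isEmpty = false := by simpa using hcur
    by_cases hs : PySem.Chars.isspace c
    · obtain ⟨t, ht⟩ := split₀_go_acc rest [] (cur.reverse :: acc)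
      refine ⟨t, ?_⟩
      simp [PySem.Chars.split₀.go, hs, he, ht]
    · obtain ⟨t, ht⟩ := ih (c :: cur) acc (by simp)
      refine ⟨t, ?_⟩
      simp [PySem.Chars.split₀.go, hs, ht]

theorem split₀_head (c : Char) (rest : List Char) (hs : PySem.Chars.isspace c = false) :
    ∃ t, PySem.Chars.split₀ (c :: rest) =
      (c :: rest.takeWhile (fun c => !PySem.Chars.isspace c)) :: t := by
  obtain ⟨t, ht⟩ := split₀_go_word rest [c] [] (by simp)
  refine ⟨t, ?_⟩
  unfold PySem.Chars.split₀
  simp [PySem.Chars.split₀.go, hs, ht]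

theorem strip_cons_space (c : Char) (l : List Char) (hs : PySem.Chars.isspace c = true) :
    PySem.Chars.strip (c :: l) = PySem.Chars.strip l := by
  simp [PySem.Chars.strip, PySem.Chars.lstrip, hs]

theorem rstrip_cons_nonspace (c : Char) (l : List Char) (hs : PySem.Chars.isspace c = false) :
    PySem.Chars.rstrip (c :: l) = c :: PySem.Chars.rstrip l := by
  simp only [PySem.Chars.rstrip, List.reverse_cons]
  rw [List.dropWhile_append]
  by_cases he : (List.dropWhile PySem.Chars.isspace l.reverse).isEmpty
  · rw [if_pos he]
    have h1 : List.dropWhile PySem.Chars.isspace l.reverse = [] := by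
      simpa using he
    simp [hs, h1]
  · rw [if_neg he]
    simp

theorem takeWhile_rstrip (l : List Char) :
    (PySem.Chars.rstrip l).takeWhile (fun c => !PySem.Chars.isspace c)
      = l.takeWhile (fun c => !PySem.Chars.isspace c) := by
  induction l with
  | nil => rfl
  | cons c rest ih =>
    by_cases hs : PySem.Chars.isspace c
    · -- rstrip (c::rest) is a prefix of c::rest, so takeWhile is [] on both sides
      have hpre : PySem.Chars.rstrip (c :: rest) <+: (c :: rest) := by
        have hsuf := List.dropWhile_suffix (l := (c :: rest).reverse) (p := PySem.Chars.isspace)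
        have := List.reverse_prefix.mpr hsuf
        simpa [PySem.Chars.rstrip] using this
      cases hr : PySem.Chars.rstrip (c :: rest) with
      | nil => simp [hs]
      | cons a t =>
        have ha : a = c := by
          rw [hr] at hpre
          obtain ⟨u, hu⟩ := hpre
          cases hu
          rfl
        subst ha
        simp [hs]
    · rw [rstrip_cons_nonspace c rest (by simpa using hs)]
      simp [hs, ih]

-- the core equivalence, at the level of character lists
theorem pv_main (cs : List Char) :
    (match ((pvSpl cs).map PySem.Chars.strip).filter (fun p => !p.isEmpty) with
      | [] => ([] : List Char)
      | first :: _ =>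
        match PySem.Chars.split₀ first with
        | [] => []
        | t :: _ => t)
    = (cs.dropWhile pvSep).takeWhile (fun c => !pvSep c) := by
  induction cs with
  | nil => rfl
  | cons c rest ih =>
    by_cases hc : c = ','
    · subst hc
      have hsep : pvSep ',' = true := by simp [pvSep]
      have hdw : List.dropWhile pvSep (',' :: rest) = List.dropWhile pvSep rest := by
        simp [hsep]
      simp only [pvSpl, hdw]
      exact ih
    · by_cases hs : PySem.Chars.isspace c
      · have hsep : pvSep c = true := by simp [pvSep, hs]
        have hdw : List.dropWhile pvSep (c :: rest) = List.dropWhile pvSep rest := by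
          simp [hsep]
        obtain ⟨h', t', hrest⟩ := List.exists_cons_of_ne_nil (pvSpl_ne_nil rest)
        rw [hrest] at ih
        simp only [List.map_cons, List.filter_cons] at ih
        simp only [pvSpl, if_neg hc, hrest, List.modifyHead, List.map_cons, List.filter_cons,
          strip_cons_space c h' hs, hdw]
        exact ih
      · -- c is the first character of the answer
        have hsb : PySem.Chars.isspace c = false := by simpa using hs
        have hsep : pvSep c = false := by simp [pvSep, hc, hsb]
        obtain ⟨t0, ht0⟩ := pvSpl_head rest
        have hstrip : PySem.Chars.strip (c :: rest.takeWhile (fun c => !(c == ',')))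
            = c :: PySem.Chars.rstrip (rest.takeWhile (fun c => !(c == ','))) := by
          have hlst : PySem.Chars.lstrip (c :: rest.takeWhile (fun c => !(c == ',')))
              = c :: rest.takeWhile (fun c => !(c == ',')) := by
            simp [PySem.Chars.lstrip, hsb]
          rw [PySem.Chars.strip, hlst, rstrip_cons_nonspace _ _ hsb]
        obtain ⟨tw, htw⟩ :=
          split₀_head c (PySem.Chars.rstrip (rest.takeWhile (fun c => !(c == ',')))) hsb
        simp only [pvSpl, if_neg hc, ht0, List.modifyHead, List.map_cons, List.filter_cons,
          hstrip, List.isEmpty_cons, Bool.not_false, if_pos, htw]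
        rw [takeWhile_rstrip, List.takeWhile_takeWhile]
        have hfun : (fun a => decide ((!PySem.Chars.isspace a) = true ∧ (!(a == ',')) = true))
            = fun a => !pvSep a := by
          funext x
          by_cases hx : x = ',' <;> by_cases hxs : PySem.Chars.isspace x <;>
            simp [pvSep, hx, hxs]
        rw [hfun]
        have hdw : List.dropWhile pvSep (c :: rest) = c :: rest := by
          simp [hsep]
        rw [hdw, List.takeWhile_cons, hsep]
        simp

-- Bool-level: a String is "" iff its char list is empty
theorem beq_empty_eq_isEmpty (p : String) : (p == "") = p.toList.isEmpty := by
  by_cases h : p = ""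
  · simp [h]
  · have hl : p.toList ≠ [] := by
      intro hl
      exact h (String.toList_inj.mp (by simpa using hl))
    have h1 : (p == "") = false := by simpa using h
    have h2 : p.toList.isEmpty = false := by simpa using hl
    rw [h1, h2]

theorem map_filter_toList (l : List String) :
    ((l.map PySem.Str.strip).filter (fun p => !(p == ""))).map String.toList
      = ((l.map String.toList).map PySem.Chars.strip).filter (fun p => !p.isEmpty) := by
  induction l with
  | nil => rfl
  | cons p t ih =>
    simp only [List.map_cons, List.filter_cons]
    have hb : (!(PySem.Str.strip p == "")) = !(PySem.Chars.strip p.toList).isEmpty := by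
      rw [beq_empty_eq_isEmpty, PySem.Str.toList_strip]
    rw [hb]
    by_cases hE : (PySem.Chars.strip p.toList).isEmpty <;>
      simp [hE, ih, PySem.Str.toList_strip]

theorem str_eq_ofList (s : String) (l : List Char) (h : s.toList = l) : s = String.ofList l := by
  rw [← String.toList_inj]
  simpa using h

-- ===== VERDICT (by name: the statement is the Claim_ definition above) =====
theorem parse_srcset_first_py_spec : Claim_equal_parse_srcset_first_py := by
  intro srcset _
  unfold Spec_parse_srcset_first_py parse_srcset_first_py parse_srcset_first_py_alt
  by_cases h0 : srcset = ""
  · subst h0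
    rfl
  · have h0b : (srcset == "") = false := by simp [h0]
    simp only [h0b, Bool.false_eq_true, if_false]
    have hsplit : ∃ segs, PySem.Str.split? srcset "," = some segs ∧
        segs.map String.toList = pvSpl srcset.toList := by
      have hbr := PySem.Str.split?_map srcset ","
      rw [show (",":String).toList = [','] from rfl] at hbr
      rw [PySem.Chars.split?] at hbr
      simp only [List.isEmpty_cons, Bool.false_eq_true, if_false] at hbr
      cases hsp : PySem.Str.split? srcset "," with
      | none => rw [hsp] at hbr; simp at hbr
      | some segs =>
        rw [hsp] at hbr
        simp only [Option.map_some, Option.some.injEq] at hbr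
        exact ⟨segs, rfl, by rw [hbr, splitOn_eq_pvSpl]⟩
    obtain ⟨segs, hsegs, hmap⟩ := hsplit
    rw [hsegs]
    simp only [Option.getD_some]
    have hparts : ((segs.map PySem.Str.strip).filter (fun p => !(p == ""))).map String.toList
        = ((pvSpl srcset.toList).map PySem.Chars.strip).filter (fun p => !p.isEmpty) := by
      rw [map_filter_toList, hmap]
    have hmain := pv_main srcset.toList
    rw [← hparts] at hmain
    cases hP : ((segs.map PySem.Str.strip).filter (fun p => !(p == ""))) with
    | nil =>
      rw [hP] at hmain
      simp only [List.map_nil] at hmain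
      apply str_eq_ofList
      exact hmain
    | cons first tl =>
      rw [hP] at hmain
      simp only [List.map_cons] at hmain
      have hsp0 := PySem.Str.split₀_map_toList first
      apply str_eq_ofList
      show (match PySem.Str.split₀ first with | [] => ("" : String) | t :: _ => t).toList
          = List.takeWhile (fun c => !pvSep c) (List.dropWhile pvSep srcset.toList)
      cases hw : PySem.Str.split₀ first with
      | nil =>
        rw [hw] at hsp0
        simp only [List.map_nil] at hsp0
        rw [← hsp0] at hmain
        exact hmain
      | cons w ws =>
        rw [hw] at hsp0
        simp only [List.map_cons] at hsp0
        rw [← hsp0] at hmain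
        exact hmain
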